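-- pv_equiv track=rewrite | github.com/msaad00/agent-bom | src/agent_bom/parsers/prompt_scanner.py | _extract_prompt_from_yaml
-- ===== SOURCE A (Python) =====
-- def _extract_prompt_from_yaml(content: str) -> str:
--     """Extract prompt text from YAML-ish files without requiring PyYAML."""
--     # Look for multi-line string values (common in prompt YAML)
--     # Simple heuristic: grab values after prompt-related keys
--     lines = content.split("\n")
--     prompt_lines: list[str] = []
--     capturing = False
--
--     for line in lines:
--         stripped = line.strip()
--         lower = stripped.lower()
--
--         # Check for prompt-related YAML keys
--         if any(lower.startswith(k) for k in (
--             "prompt:", "system_prompt:", "system:", "content:",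
--             "instructions:", "template:", "message:", "text:",
--         )):
--             # Value on same line after colon
--             val = stripped.split(":", 1)[1].strip()
--             if val and val not in ("|", ">", "|-", ">-"):
--                 prompt_lines.append(val.strip("'\""))
--             capturing = True
--             continue
--
--         if capturing:
--             # Multi-line YAML string continuation (indented)
--             if line.startswith("  ") or line.startswith("\t"):
--                 prompt_lines.append(stripped)
--             elif stripped == "":
--                 prompt_lines.append("")
--             else:
--                 capturing = False
--
--     return "\n".join(prompt_lines) if prompt_lines else content
-- ===== SOURCE B (Python) =====
-- _KEYS = ("prompt:", "system_prompt:", "system:", "content:",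
--          "instructions:", "template:", "message:", "text:")
--
--
-- def _classify(line: str):
--     """Tag a line: 'key' (prompt key), 'cont' (indented or blank), 'stop' (anything else)."""
--     s = line.strip()
--     if s.lower().startswith(_KEYS):
--         return ("key", s)
--     if line.startswith("  ") or line.startswith("\t"):
--         return ("cont", s)
--     if s == "":
--         return ("cont", "")
--     return ("stop", s)
--
--
-- def _extract_prompt_from_yaml(content: str) -> str:
--     """Extract prompt text from YAML-ish files without requiring PyYAML."""
--     lines = content.split("\n")
--     tags = [_classify(l) for l in lines]
--     out: list[str] = []
--     for i, (tag, s) in enumerate(tags):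
--         if tag == "key":
--             val = s.split(":", 1)[1].strip()
--             if val and val not in ("|", ">", "|-", ">-"):
--                 out.append(val.strip("'\""))
--         elif tag == "cont":
--             # emitted iff the nearest non-continuation line above is a key line
--             j = i - 1
--             while j >= 0 and tags[j][0] == "cont":
--                 j -= 1
--             if j >= 0 and tags[j][0] == "key":
--                 out.append(s)
--     return "\n".join(out) if out else content
-- ===== Notes on version B (the rewrite author's own statement) =====
-- stated objective: alternative
-- what changed: Replaces A's single stateful pass with a capturing flag by a two-stage pipeline: first tag every line (key/continuation/stop), then decide each line independently, deciding a continuation line by a backward scan over the tags for the nearest non-continuation line above it.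
import Mathlib
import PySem

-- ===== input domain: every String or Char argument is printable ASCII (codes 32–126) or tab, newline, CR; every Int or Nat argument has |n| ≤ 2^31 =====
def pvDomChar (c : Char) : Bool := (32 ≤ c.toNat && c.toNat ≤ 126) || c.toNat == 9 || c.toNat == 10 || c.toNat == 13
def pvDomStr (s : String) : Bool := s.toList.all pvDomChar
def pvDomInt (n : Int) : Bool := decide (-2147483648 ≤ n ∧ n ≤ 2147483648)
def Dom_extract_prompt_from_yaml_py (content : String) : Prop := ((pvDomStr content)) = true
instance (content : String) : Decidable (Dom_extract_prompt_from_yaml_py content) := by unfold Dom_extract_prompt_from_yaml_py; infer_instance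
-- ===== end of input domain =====

-- B replaces A's stateful capturing flag by a stateless two-stage pipeline: tag every
-- line first, then decide each line independently via a backward lookback over the tags
-- (objective: alternative decomposition, same observable behaviour).

-- ===== PORT A =====
-- the prompt-related YAML keys, in A's order
def pvKeys : List String :=
  ["prompt:", "system_prompt:", "system:", "content:",
   "instructions:", "template:", "message:", "text:"]

-- one iteration of A's for-loop; state = (prompt_lines, capturing).
-- stripped.split(":", 1)[1] is ported with getD: sep ":" is non-empty (split? = some) and
-- index 1 always exists on the key branch (the stripped line contains ':'), so Python never raises here.
def pvAStep (st : List String × Bool) (line : String) : List String × Bool :=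
  let stripped := PySem.Str.strip line
  let lower := PySem.Str.lower stripped
  if pvKeys.any (fun k => PySem.Str.startswith lower k) then
    let val := PySem.Str.strip (((PySem.Str.splitMax? stripped ":" 1).getD []).getD 1 "")
    if val ≠ "" ∧ val ∉ (["|", ">", "|-", ">-"] : List String) then
      (st.1 ++ [PySem.Str.stripChars val "'\""], true)
    else
      (st.1, true)
  else if st.2 then
    if PySem.Str.startswith line "  " || PySem.Str.startswith line "\t" then
      (st.1 ++ [stripped], true)
    else if stripped = "" then
      (st.1 ++ [""], true)
    else
      (st.1, false)
  else
    st

def extract_prompt_from_yaml_py (content : String) : String :=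
  let lines := (PySem.Str.split? content "\n").getD []
  let st := lines.foldl pvAStep ([], false)
  if st.1 ≠ [] then PySem.Str.join "\n" st.1 else content

-- ===== PORT B =====
-- line tags of Source B's _classify: "key" / "cont" / "stop"
inductive PvTag where
  | key | cont | stop
deriving DecidableEq, Repr

-- helper _classify of Source B
def pvClassify (line : String) : PvTag × String :=
  let s := PySem.Str.strip line
  if pvKeys.any (fun k => PySem.Str.startswith (PySem.Str.lower s) k) then (.key, s)
  else if PySem.Str.startswith line "  " || PySem.Str.startswith line "\t" then (.cont, s)
  else if s = "" then (.cont, "")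
  else (.stop, s)

-- Source B's inner while-loop: walk j = i-1, i-2, … over 'cont' tags; true iff the first
-- non-'cont' tag found is 'key'.  Argument is j+1 so the recursion is on Nat; tags[j]
-- is always in range in Source B, so getD's default is never used.
def pvIsKeyAbove (tags : List (PvTag × String)) : Nat → Bool
  | 0 => false
  | j + 1 =>
    if (tags.getD j (.stop, "")).1 = .cont then pvIsKeyAbove tags j
    else decide ((tags.getD j (.stop, "")).1 = .key)

-- the body of Source B's for-loop over enumerate(tags): what line i contributes to out
def pvEmitAt (tags : List (PvTag × String)) (i : Int) (ts : PvTag × String) : List String :=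
  match ts.1 with
  | .key =>
    let val := PySem.Str.strip (((PySem.Str.splitMax? ts.2 ":" 1).getD []).getD 1 "")
    if val ≠ "" ∧ val ∉ (["|", ">", "|-", ">-"] : List String) then
      [PySem.Str.stripChars val "'\""]
    else []
  | .cont => if pvIsKeyAbove tags i.toNat then [ts.2] else []
  | .stop => []

def extract_prompt_from_yaml_py_alt (content : String) : String :=
  let lines := (PySem.Str.split? content "\n").getD []
  let tags := lines.map pvClassify
  let out := (PySem.List.enumerate tags).foldl (fun acc p => acc ++ pvEmitAt tags p.1 p.2) []
  if out ≠ [] then PySem.Str.join "\n" out else content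

-- ===== PRECONDITION & SPEC =====
def Spec_extract_prompt_from_yaml_py (content : String) (out : String) : Prop := out = extract_prompt_from_yaml_py_alt content
instance (content : String) (out : String) : Decidable (Spec_extract_prompt_from_yaml_py content out) := by unfold Spec_extract_prompt_from_yaml_py; infer_instance

-- ===== CLAIM =====
def Claim_equal_extract_prompt_from_yaml_py : Prop := ∀ (content : String), Dom_extract_prompt_from_yaml_py content → Spec_extract_prompt_from_yaml_py content (extract_prompt_from_yaml_py content)

-- ===== LEMMAS AND PROOFS =====

-- reference semantics: A's loop restated over tags with the explicit capturing flag
def pvEmit : List (PvTag × String) → Bool → List String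
  | [], _ => []
  | (t, s) :: r, b =>
    match t with
    | .key =>
      (let val := PySem.Str.strip (((PySem.Str.splitMax? s ":" 1).getD []).getD 1 "")
       if val ≠ "" ∧ val ∉ (["|", ">", "|-", ">-"] : List String) then
         [PySem.Str.stripChars val "'\""]
       else []) ++ pvEmit r true
    | .cont => (if b then [s] else []) ++ pvEmit r b
    | .stop => pvEmit r false

-- A's fold equals pvEmit over the classified lines
theorem pvA_eq_emit : ∀ (ls : List String) (acc : List String) (b : Bool),
    (ls.foldl pvAStep (acc, b)).1 = acc ++ pvEmit (ls.map pvClassify) b := by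
  intro ls
  induction ls with
  | nil => intro acc b; simp [pvEmit]
  | cons line rest ih =>
    intro acc b
    simp only [List.foldl_cons, List.map_cons]
    by_cases hk : (pvKeys.any (fun k =>
        PySem.Str.startswith (PySem.Str.lower (PySem.Str.strip line)) k)) = true
    · have hc : pvClassify line = (.key, PySem.Str.strip line) := by
        simp only [pvClassify]; rw [if_pos hk]
      have hs : pvAStep (acc, b) line =
          (acc ++ (let val := PySem.Str.strip (((PySem.Str.splitMax? (PySem.Str.strip line) ":" 1).getD []).getD 1 "")
            if val ≠ "" ∧ val ∉ (["|", ">", "|-", ">-"] : List String) then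
              [PySem.Str.stripChars val "'\""] else []), true) := by
        simp only [pvAStep]
        rw [if_pos hk]
        split_ifs <;> simp
      rw [hs, ih, hc]
      simp [pvEmit, List.append_assoc]
    · by_cases hi : (PySem.Str.startswith line "  " || PySem.Str.startswith line "\t") = true
      · have hc : pvClassify line = (.cont, PySem.Str.strip line) := by
          simp only [pvClassify]; rw [if_neg hk, if_pos hi]
        cases b with
        | true =>
          have hs : pvAStep (acc, true) line = (acc ++ [PySem.Str.strip line], true) := by
            simp only [pvAStep]
            rw [if_neg hk, if_pos trivial, if_pos hi]
          rw [hs, ih, hc]; simp [pvEmit, List.append_assoc]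
        | false =>
          have hs : pvAStep (acc, false) line = (acc, false) := by
            simp only [pvAStep]
            rw [if_neg hk, if_neg (show ¬((acc, false) : List String × Bool).2 = true by simp)]
          rw [hs, ih, hc]; simp [pvEmit]
      · by_cases hb : PySem.Str.strip line = ""
        · have hc : pvClassify line = (.cont, "") := by
            simp only [pvClassify]; rw [if_neg hk, if_neg hi, if_pos hb]
          cases b with
          | true =>
            have hs : pvAStep (acc, true) line = (acc ++ [""], true) := by
              simp only [pvAStep]
              rw [if_neg hk, if_pos trivial, if_neg hi, if_pos hb]
            rw [hs, ih, hc]; simp [pvEmit, List.append_assoc]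
          | false =>
            have hs : pvAStep (acc, false) line = (acc, false) := by
              simp only [pvAStep]
              rw [if_neg hk, if_neg (show ¬((acc, false) : List String × Bool).2 = true by simp)]
            rw [hs, ih, hc]; simp [pvEmit]
        · have hc : pvClassify line = (.stop, PySem.Str.strip line) := by
            simp only [pvClassify]; rw [if_neg hk, if_neg hi, if_neg hb]
          cases b with
          | true =>
            have hs : pvAStep (acc, true) line = (acc, false) := by
              simp only [pvAStep]
              rw [if_neg hk, if_pos trivial, if_neg hi, if_neg hb]
            rw [hs, ih, hc]; simp [pvEmit]
          | false =>
            have hs : pvAStep (acc, false) line = (acc, false) := by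
              simp only [pvAStep]
              rw [if_neg hk, if_neg (show ¬((acc, false) : List String × Bool).2 = true by simp)]
            rw [hs, ih, hc]; simp [pvEmit]

-- the lookback computes exactly the capturing flag: stepping past tags[k]
theorem pvIsKeyAbove_succ (tags : List (PvTag × String)) (k : Nat) (t : PvTag) (s : String)
    (h : tags[k]? = some (t, s)) :
    pvIsKeyAbove tags (k + 1) =
      (if t = .cont then pvIsKeyAbove tags k else decide (t = .key)) := by
  simp [pvIsKeyAbove, List.getD, h]

-- B's enumerated fold over a suffix equals pvEmit of that suffix started in the lookback state
theorem pvB_eq_emit : ∀ (suf : List (PvTag × String)) (tags : List (PvTag × String)) (k : Nat),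
    tags.drop k = suf →
    (PySem.List.enumerate suf (k : Int)).flatMap (fun p => pvEmitAt tags p.1 p.2) =
      pvEmit suf (pvIsKeyAbove tags k) := by
  intro suf
  induction suf with
  | nil => intro tags k _; simp [PySem.List.enumerate_nil, pvEmit]
  | cons ts rest ih =>
    intro tags k hdrop
    have hk : tags[k]? = some ts := by
      have h0 : (tags.drop k)[0]? = some ts := by rw [hdrop]; rfl
      rwa [List.getElem?_drop, Nat.add_zero] at h0
    have hrest : tags.drop (k + 1) = rest := by
      have h1 : (tags.drop k).drop 1 = rest := by rw [hdrop]; rfl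
      rwa [List.drop_drop] at h1
    rw [PySem.List.enumerate_cons]
    simp only [List.flatMap_cons]
    have hsucc : ((k : Int) + 1) = ((k + 1 : Nat) : Int) := by push_cast; ring
    rw [hsucc, ih tags (k + 1) hrest]
    obtain ⟨t, s⟩ := ts
    rw [pvIsKeyAbove_succ tags k t s hk]
    cases t with
    | key => simp [pvEmitAt, pvEmit]
    | cont =>
      have : ((k : Int)).toNat = k := by simp
      simp [pvEmitAt, pvEmit, this]
    | stop => simp [pvEmitAt, pvEmit]

-- ===== VERDICT =====
theorem extract_prompt_from_yaml_py_spec : Claim_equal_extract_prompt_from_yaml_py := by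
  intro content _
  unfold Spec_extract_prompt_from_yaml_py extract_prompt_from_yaml_py extract_prompt_from_yaml_py_alt
  dsimp only
  have hA := pvA_eq_emit ((PySem.Str.split? content "\n").getD []) [] false
  simp only [List.nil_append] at hA
  have hB := pvB_eq_emit (((PySem.Str.split? content "\n").getD []).map pvClassify)
      (((PySem.Str.split? content "\n").getD []).map pvClassify) 0 (by simp)
  rw [show pvIsKeyAbove (((PySem.Str.split? content "\n").getD []).map pvClassify) 0 = false
      from rfl] at hB
  rw [Nat.cast_zero] at hB
  rw [PySem.List.foldl_append_eq_flatMap]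
  simp only [List.nil_append]
  rw [hA, hB]
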